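-- pv_equiv track=rewrite | github.com/devReVibeX/The-Mind-matters | mentaltrain_final.py | parse_indicators
-- ===== SOURCE A (Python) =====
-- IND  = ["sleep_issues","appetite_change","fatigue","overthinking","concentration_problems"]
--
-- i2id = {k:i for i,k in enumerate(IND)}
--
-- def parse_indicators(v):
--     vec = [0]*len(IND)
--     if not v: return vec
--     for x in v.split("|"):
--         x = x.strip().lower()
--         if x in i2id:
--             vec[i2id[x]] = 1
--     return vec
-- ===== SOURCE B (Python) =====
-- IND  = ["sleep_issues","appetite_change","fatigue","overthinking","concentration_problems"]
--
-- def parse_indicators(v):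
--     if not v:
--         return [0] * len(IND)
--     tokens = {x.strip().lower() for x in v.split("|")}
--     return [1 if ind in tokens else 0 for ind in IND]
-- ===== Notes on version B (the rewrite author's own statement) =====
-- stated objective: idiomatic
-- what changed: B builds a set of normalized tokens once and produces the vector by a comprehension over the canonical indicator list, instead of A's loop over the input tokens that mutates a preallocated list through an index dictionary.
import Mathlib
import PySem

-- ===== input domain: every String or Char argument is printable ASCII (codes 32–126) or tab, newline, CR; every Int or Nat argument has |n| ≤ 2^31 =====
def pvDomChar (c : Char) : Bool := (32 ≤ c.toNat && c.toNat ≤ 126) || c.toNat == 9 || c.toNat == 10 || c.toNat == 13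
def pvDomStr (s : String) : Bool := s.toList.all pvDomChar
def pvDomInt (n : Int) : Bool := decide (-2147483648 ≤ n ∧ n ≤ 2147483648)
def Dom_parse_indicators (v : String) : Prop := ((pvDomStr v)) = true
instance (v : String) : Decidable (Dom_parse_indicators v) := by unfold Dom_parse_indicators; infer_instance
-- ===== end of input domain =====

-- B builds a set of normalized tokens once and maps over the canonical indicator list,
-- instead of A's loop over the input tokens mutating a preallocated vector through an index dict (idiomatic; same cost).

-- ===== PORT A =====
def pvIND : List String :=
  ["sleep_issues","appetite_change","fatigue","overthinking","concentration_problems"]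

-- i2id = {k:i for i,k in enumerate(IND)}
def pvI2id : PySem.Dict String Int :=
  (PySem.List.enumerate pvIND).foldl (fun d p => d.insert p.2 p.1) PySem.Dict.empty

def pvStepA (vec : List Int) (x : String) : List Int :=
  let x := PySem.Str.lower (PySem.Str.strip x)
  match PySem.Dict.get? pvI2id x with
  | some i => PySem.List.pySetD vec i 1    -- vec[i2id[x]] = 1 (index always in range)
  | none => vec

def parse_indicators (v : String) : List Int :=
  let vec := List.replicate pvIND.length (0 : Int)
  if v = "" then vec
  else ((PySem.Str.split? v "|").getD []).foldl pvStepA vec   -- sep "|" ≠ "", so split? is never none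

-- ===== PORT B =====
def parse_indicators_alt (v : String) : List Int :=
  if v = "" then List.replicate pvIND.length (0 : Int)
  else
    let tokens : PySem.Set String :=
      PySem.Set.ofList (((PySem.Str.split? v "|").getD []).map
        (fun x => PySem.Str.lower (PySem.Str.strip x)))
    pvIND.map (fun ind => if PySem.Set.contains tokens ind then (1 : Int) else 0)

-- ===== PRECONDITION & SPEC =====
def Spec_parse_indicators (v : String) (out : List Int) : Prop := out = parse_indicators_alt v
instance (v : String) (out : List Int) : Decidable (Spec_parse_indicators v out) := by unfold Spec_parse_indicators; infer_instance

-- ===== CLAIM (what is proved, stated in full; the proofs are below) =====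
def Claim_equal_parse_indicators : Prop := ∀ (v : String), Dom_parse_indicators v → Spec_parse_indicators v (parse_indicators v)

-- ===== LEMMAS AND PROOFS =====

-- the indicator vector as a function of the five membership flags
def pvF (b1 b2 b3 b4 b5 : Bool) : List Int :=
  [cond b1 1 0, cond b2 1 0, cond b3 1 0, cond b4 1 0, cond b5 1 0]

def pvNorm (x : String) : String := PySem.Str.lower (PySem.Str.strip x)

theorem get?_pvI2id (y : String) :
    PySem.Dict.get? pvI2id y =
      (if y = "sleep_issues" then some 0 else if y = "appetite_change" then some 1
       else if y = "fatigue" then some 2 else if y = "overthinking" then some 3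
       else if y = "concentration_problems" then some 4 else none) := by
  by_cases h1 : y = "sleep_issues"; · subst h1; decide
  by_cases h2 : y = "appetite_change"; · subst h2; decide
  by_cases h3 : y = "fatigue"; · subst h3; decide
  by_cases h4 : y = "overthinking"; · subst h4; decide
  by_cases h5 : y = "concentration_problems"; · subst h5; decide
  have g1 : ("sleep_issues" == y) = false := by simp; exact fun h => h1 h.symm
  have g2 : ("appetite_change" == y) = false := by simp; exact fun h => h2 h.symm
  have g3 : ("fatigue" == y) = false := by simp; exact fun h => h3 h.symm
  have g4 : ("overthinking" == y) = false := by simp; exact fun h => h4 h.symm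
  have g5 : ("concentration_problems" == y) = false := by simp; exact fun h => h5 h.symm
  simp only [pvI2id, pvIND, PySem.List.enumerate, PySem.Dict.get?, PySem.Dict.insert,
    PySem.Dict.empty]
  simp [List.find?, g1, g2, g3, g4, g5, h1, h2, h3, h4, h5]

theorem pvStepA_char (b1 b2 b3 b4 b5 : Bool) (x : String) :
    pvStepA (pvF b1 b2 b3 b4 b5) x =
      pvF (b1 || pvNorm x == "sleep_issues") (b2 || pvNorm x == "appetite_change")
          (b3 || pvNorm x == "fatigue") (b4 || pvNorm x == "overthinking")
          (b5 || pvNorm x == "concentration_problems") := by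
  simp only [pvStepA]
  rw [show PySem.Str.lower (PySem.Str.strip x) = pvNorm x from rfl, get?_pvI2id]
  generalize pvNorm x = y
  by_cases h1 : y = "sleep_issues"
  · subst h1; cases b1 <;> cases b2 <;> cases b3 <;> cases b4 <;> cases b5 <;> decide
  by_cases h2 : y = "appetite_change"
  · subst h2; cases b1 <;> cases b2 <;> cases b3 <;> cases b4 <;> cases b5 <;> decide
  by_cases h3 : y = "fatigue"
  · subst h3; cases b1 <;> cases b2 <;> cases b3 <;> cases b4 <;> cases b5 <;> decide
  by_cases h4 : y = "overthinking"
  · subst h4; cases b1 <;> cases b2 <;> cases b3 <;> cases b4 <;> cases b5 <;> decide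
  by_cases h5 : y = "concentration_problems"
  · subst h5; cases b1 <;> cases b2 <;> cases b3 <;> cases b4 <;> cases b5 <;> decide
  have e1 : (y == "sleep_issues") = false := beq_eq_false_iff_ne.mpr h1
  have e2 : (y == "appetite_change") = false := beq_eq_false_iff_ne.mpr h2
  have e3 : (y == "fatigue") = false := beq_eq_false_iff_ne.mpr h3
  have e4 : (y == "overthinking") = false := beq_eq_false_iff_ne.mpr h4
  have e5 : (y == "concentration_problems") = false := beq_eq_false_iff_ne.mpr h5
  simp [h1, h2, h3, h4, h5, e1, e2, e3, e4, e5]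

theorem pvLoop_char (ts : List String) (b1 b2 b3 b4 b5 : Bool) :
    ts.foldl pvStepA (pvF b1 b2 b3 b4 b5) =
      pvF (b1 || (ts.map pvNorm).contains "sleep_issues")
          (b2 || (ts.map pvNorm).contains "appetite_change")
          (b3 || (ts.map pvNorm).contains "fatigue")
          (b4 || (ts.map pvNorm).contains "overthinking")
          (b5 || (ts.map pvNorm).contains "concentration_problems") := by
  induction ts generalizing b1 b2 b3 b4 b5 with
  | nil => simp
  | cons t ts ih =>
    have key : ∀ (a : Bool) (u k : String) (ns : List String),
        ((a || u == k) || ns.contains k) = (a || (k == u || ns.contains k)) := by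
      intro a u k ns
      by_cases h : u = k
      · subst h; simp
      · have e1 : (u == k) = false := beq_eq_false_iff_ne.mpr h
        have e2 : (k == u) = false := beq_eq_false_iff_ne.mpr (Ne.symm h)
        simp [e1, e2]
    simp only [List.foldl_cons, pvStepA_char, ih, List.map_cons, List.contains_cons]
    rw [key, key, key, key, key]

theorem contains_ofList_eq (ns : List String) (k : String) :
    PySem.Set.contains (PySem.Set.ofList ns) k = ns.contains k := by
  have h1 : PySem.Set.contains (PySem.Set.ofList ns) k = true ↔ k ∈ ns := by
    rw [PySem.Set.contains_iff, PySem.Set.mem_ofList]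
  have h2 : ns.contains k = true ↔ k ∈ ns := List.contains_iff_mem
  cases hc : PySem.Set.contains (PySem.Set.ofList ns) k <;>
    cases hn : ns.contains k <;> simp_all

-- ===== VERDICT (by name: the statement is the Claim_ definition above) =====
theorem parse_indicators_spec : Claim_equal_parse_indicators := by
  intro v _
  unfold Spec_parse_indicators parse_indicators parse_indicators_alt
  by_cases hv : v = ""
  · simp [hv]
  · simp only [if_neg hv]
    have h0 : List.replicate pvIND.length (0 : Int) = pvF false false false false false := rfl
    rw [h0]
    rw [show (fun x => PySem.Str.lower (PySem.Str.strip x)) = pvNorm from rfl]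
    rw [pvLoop_char]
    simp only [Bool.false_or, pvIND, List.map_cons, List.map_nil, contains_ofList_eq, pvF]
    simp [Bool.cond_eq_ite]
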